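-- pv_equiv track=rewrite | github.com/OrPerets/dss-custom-tree | python-lib/employee_tree/service.py | _apply_change_log
-- ===== SOURCE A (Python) =====
-- def _apply_change_log(employee_rows, change_log):
--     updated_rows = [dict(row) for row in employee_rows]
--     rows_by_id = {}
--
--     for row in updated_rows:
--         employee_id = row.get("employee_id")
--         if employee_id is not None:
--             rows_by_id[str(employee_id).strip()] = row
--
--     for entry in change_log:
--         employee_id = entry.get("employee_id")
--         new_manager_id = entry.get("new_manager_id")
--
--         if not employee_id or employee_id not in rows_by_id:
--             raise ValueError("Change log references unknown employee '{0}'.".format(employee_id))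
--         if not new_manager_id or new_manager_id not in rows_by_id:
--             raise ValueError("Change log references unknown manager '{0}'.".format(new_manager_id))
--
--         rows_by_id[employee_id]["manager_id"] = new_manager_id
--
--     return updated_rows
-- ===== SOURCE B (Python) =====
-- def _apply_change_log(employee_rows, change_log):
--     known_ids = set()
--     for row in employee_rows:
--         employee_id = row.get("employee_id")
--         if employee_id is not None:
--             known_ids.add(str(employee_id).strip())
--
--     final_manager = {}
--     for entry in change_log:
--         employee_id = entry.get("employee_id")
--         new_manager_id = entry.get("new_manager_id")
--
--         if not employee_id or employee_id not in known_ids: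
--             raise ValueError("Change log references unknown employee '{0}'.".format(employee_id))
--         if not new_manager_id or new_manager_id not in known_ids:
--             raise ValueError("Change log references unknown manager '{0}'.".format(new_manager_id))
--
--         final_manager[employee_id] = new_manager_id
--
--     updated_rows = []
--     for row in employee_rows:
--         new_row = dict(row)
--         employee_id = new_row.get("employee_id")
--         if employee_id is not None and str(employee_id).strip() in final_manager:
--             new_row["manager_id"] = final_manager[str(employee_id).strip()]
--         updated_rows.append(new_row)
--     return updated_rows
-- ===== Notes on version B (the rewrite author's own statement) =====
-- stated objective: alternative
-- what changed: B replaces A's build-a-row-alias-index-then-mutate scheme by two independent passes: it first validates the change log against a plain set of known ids and folds it into a net employee->final-manager mapping, then rebuilds the row list in one pass applying that mapping; Pre_ excludes inputs where A raises ValueError and inputs where a change-log entry targets a stripped employee_id shared by several rows, on which A's dict-reinsertion (last row wins) target is accidental.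
import Mathlib
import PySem

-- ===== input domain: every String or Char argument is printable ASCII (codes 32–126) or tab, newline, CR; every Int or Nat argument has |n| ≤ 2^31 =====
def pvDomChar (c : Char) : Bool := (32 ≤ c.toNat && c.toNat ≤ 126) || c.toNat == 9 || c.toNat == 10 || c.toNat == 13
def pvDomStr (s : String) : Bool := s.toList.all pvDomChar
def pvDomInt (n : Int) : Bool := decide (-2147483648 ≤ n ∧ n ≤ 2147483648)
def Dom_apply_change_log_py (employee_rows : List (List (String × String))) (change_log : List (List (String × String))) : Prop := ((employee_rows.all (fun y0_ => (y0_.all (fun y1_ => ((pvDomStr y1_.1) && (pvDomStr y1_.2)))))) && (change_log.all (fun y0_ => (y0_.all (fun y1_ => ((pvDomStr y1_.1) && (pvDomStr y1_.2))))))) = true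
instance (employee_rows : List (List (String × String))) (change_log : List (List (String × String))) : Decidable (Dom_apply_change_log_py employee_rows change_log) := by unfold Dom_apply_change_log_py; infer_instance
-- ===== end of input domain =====

-- B validates the log against a set of known ids, folds it into a net employee→final-manager map,
-- then rebuilds the rows in one pass (objective: alternative). Python A mutates nothing the caller
-- passed (it copies each row); the equivalence is about the return value.

-- shared helper: row.get(k) on a dict rendered as an association list (first-match lookup)
def pvRowGet (row : List (String × String)) (k : String) : Option String :=
  (PySem.Dict.mk row).get? k

-- row["manager_id"] = m  (Python dict assignment: overwrite in place, else append)
def pvSetManager (row : List (String × String)) (m : String) : List (String × String) :=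
  ((PySem.Dict.mk row).insert "manager_id" m).items

-- ===== PORT A =====
-- A keys rows_by_id by stripped id to the ROW OBJECT and mutates through the alias; the pure port
-- models the alias as the row's INDEX in updated_rows (exact: only "manager_id" is ever written).
def pvBuildIdx : List (List (String × String)) → Nat → PySem.Dict String Nat → PySem.Dict String Nat
  | [], _, d => d
  | r :: rs, i, d =>
      pvBuildIdx rs (i + 1)
        (match pvRowGet r "employee_id" with
         | some e => d.insert (PySem.Str.strip e) i
         | none => d)

-- loop body of A's `for entry in change_log`; where Python raises ValueError the port leaves the
-- rows unchanged (those inputs are outside Pre_).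
def pvStepA (idx : PySem.Dict String Nat) (rs : List (List (String × String)))
    (entry : List (String × String)) : List (List (String × String)) :=
  match pvRowGet entry "employee_id" with
  | none => rs
  | some e =>
    if e = "" then rs
    else
      match idx.get? e with
      | none => rs
      | some i =>
        match pvRowGet entry "new_manager_id" with
        | none => rs
        | some m =>
          if m = "" then rs
          else if (idx.get? m).isSome then rs.modify i (fun row => pvSetManager row m)
          else rs

def apply_change_log_py (employee_rows : List (List (String × String))) (change_log : List (List (String × String))) : List (List (String × String)) :=
  let idx := pvBuildIdx employee_rows 0 PySem.Dict.empty
  change_log.foldl (pvStepA idx) employee_rows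

-- ===== PORT B =====
-- pass 1 of Source B: known_ids = the set of stripped employee ids
def pvKnownIds (rows : List (List (String × String))) : PySem.Set String :=
  rows.foldl
    (fun s r =>
      match pvRowGet r "employee_id" with
      | some e => PySem.Set.add s (PySem.Str.strip e)
      | none => s)
    PySem.Set.empty

-- pass 2 of Source B: validate one entry and record its net effect; where Python raises ValueError the
-- port leaves the map unchanged (those inputs are outside Pre_).
def pvLogStep (known : PySem.Set String) (d : PySem.Dict String String)
    (entry : List (String × String)) : PySem.Dict String String :=
  match pvRowGet entry "employee_id" with
  | none => d
  | some e =>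
    if e = "" then d
    else if !(PySem.Set.contains known e) then d
    else
      match pvRowGet entry "new_manager_id" with
      | none => d
      | some m =>
        if m = "" then d
        else if !(PySem.Set.contains known m) then d
        else d.insert e m

-- pass 3 of Source B: rebuild one row under the net mapping
def pvApplyRow (fm : PySem.Dict String String) (row : List (String × String)) : List (String × String) :=
  match pvRowGet row "employee_id" with
  | none => row
  | some e =>
    match fm.get? (PySem.Str.strip e) with
    | none => row
    | some m => pvSetManager row m

def apply_change_log_py_alt (employee_rows : List (List (String × String))) (change_log : List (List (String × String))) : List (List (String × String)) :=
  let known := pvKnownIds employee_rows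
  let fm := change_log.foldl (pvLogStep known) PySem.Dict.empty
  employee_rows.map (pvApplyRow fm)

-- ===== PRECONDITION & SPEC =====
-- does row r carry an employee_id whose stripped form is k?
def pvMatchE (k : String) (r : List (String × String)) : Bool :=
  match pvRowGet r "employee_id" with
  | some e => PySem.Str.strip e == k
  | none => false

-- Pre_ excludes (a) the inputs where Python A raises ValueError (an entry with a missing/empty or
-- unknown employee_id or new_manager_id) and (b) entries whose employee_id is a stripped id shared
-- by several rows, where A's dict-reinsertion makes the LAST such row the accidental mutation target.
def pvEntryOk (rows : List (List (String × String))) (entry : List (String × String)) : Bool :=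
  (match pvRowGet entry "employee_id" with
   | some e => e ≠ "" && rows.countP (pvMatchE e) == 1
   | none => false) &&
  (match pvRowGet entry "new_manager_id" with
   | some m => m ≠ "" && rows.any (pvMatchE m)
   | none => false)

def Pre_apply_change_log_py (employee_rows : List (List (String × String))) (change_log : List (List (String × String))) : Prop :=
  (change_log.all (pvEntryOk employee_rows)) = true

instance (employee_rows : List (List (String × String))) (change_log : List (List (String × String))) : Decidable (Pre_apply_change_log_py employee_rows change_log) := by unfold Pre_apply_change_log_py; infer_instance

def pvWitness_apply_change_log_py : (List (List (String × String))) × (List (List (String × String))) :=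
  ([[("employee_id", "1"), ("name", "ann")], [("employee_id", " 2 ")]],
   [[("employee_id", "1"), ("new_manager_id", "2")]])

def Spec_apply_change_log_py (employee_rows : List (List (String × String))) (change_log : List (List (String × String))) (out : List (List (String × String))) : Prop := out = apply_change_log_py_alt employee_rows change_log
instance (employee_rows : List (List (String × String))) (change_log : List (List (String × String))) (out : List (List (String × String))) : Decidable (Spec_apply_change_log_py employee_rows change_log out) := by unfold Spec_apply_change_log_py; infer_instance

-- ===== CLAIM (what is proved, stated in full; the proofs are below) =====
def Claim_equal_apply_change_log_py : Prop := ∀ (employee_rows : List (List (String × String))) (change_log : List (List (String × String))), Dom_apply_change_log_py employee_rows change_log → Pre_apply_change_log_py employee_rows change_log → Spec_apply_change_log_py employee_rows change_log (apply_change_log_py employee_rows change_log)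

-- ===== LEMMAS AND PROOFS =====

-- two successive manager writes = the last one
theorem pvSetManager_setManager (row : List (String × String)) (m0 m : String) :
    pvSetManager (pvSetManager row m0) m = pvSetManager row m := by
  simp only [pvSetManager]
  rw [show PySem.Dict.mk ((PySem.Dict.mk row).insert "manager_id" m0).items
        = (PySem.Dict.mk row).insert "manager_id" m0 from rfl]
  rw [PySem.Dict.insert_insert_self]

theorem pvContains_add (s : PySem.Set String) (x k : String) :
    PySem.Set.contains (PySem.Set.add s x) k = (PySem.Set.contains s k || k == x) := by
  by_cases hk : k = x <;> by_cases hm : k ∈ s <;>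
    simp [PySem.Set.contains, PySem.Set.mem_add, hk, hm]

-- known_ids membership = "some row's stripped employee_id is k"
theorem pvKnownIds_contains_aux (rows : List (List (String × String))) :
    ∀ (s : PySem.Set String) (k : String),
      PySem.Set.contains
        (rows.foldl
          (fun s r =>
            match pvRowGet r "employee_id" with
            | some e => PySem.Set.add s (PySem.Str.strip e)
            | none => s) s) k
        = (rows.any (pvMatchE k) || PySem.Set.contains s k) := by
  induction rows with
  | nil => intro s k; simp
  | cons r rs ih =>
    intro s k
    simp only [List.foldl_cons, List.any_cons]
    cases hr : pvRowGet r "employee_id" with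
    | none => rw [ih]; simp [pvMatchE, hr]
    | some e =>
      rw [ih, pvContains_add]
      simp only [pvMatchE, hr]
      by_cases hk : PySem.Str.strip e = k
      · subst hk; simp
      · have hk1 : (PySem.Str.strip e == k) = false := beq_eq_false_iff_ne.mpr hk
        have hk2 : (k == PySem.Str.strip e) = false :=
          beq_eq_false_iff_ne.mpr (fun h => hk h.symm)
        simp [hk1, hk2]

theorem pvKnownIds_contains (rows : List (List (String × String))) (k : String) :
    PySem.Set.contains (pvKnownIds rows) k = rows.any (pvMatchE k) := by
  rw [pvKnownIds, pvKnownIds_contains_aux]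
  simp [PySem.Set.contains, PySem.Set.empty]

-- A's index scan: vacuous when no row matches
theorem pvBuildIdx_get?_of_count_zero (k : String) :
    ∀ (rows : List (List (String × String))), rows.countP (pvMatchE k) = 0 →
      ∀ (i : Nat) (d : PySem.Dict String Nat), (pvBuildIdx rows i d).get? k = d.get? k := by
  intro rows
  induction rows with
  | nil => intro _ i d; rfl
  | cons r rs ih =>
    intro h i d
    rw [List.countP_cons] at h
    by_cases hpm : pvMatchE k r = true
    · exfalso; rw [if_pos hpm] at h; omega
    · rw [if_neg hpm] at h
      have hcnt : rs.countP (pvMatchE k) = 0 := by omega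
      simp only [pvBuildIdx]
      cases hr : pvRowGet r "employee_id" with
      | none => exact ih hcnt _ _
      | some e =>
        have hne : k ≠ PySem.Str.strip e := by
          intro hkk
          exact hpm (by simp [pvMatchE, hr, hkk])
        rw [ih hcnt, PySem.Dict.get?_insert]
        simp [hne]

-- A's index at a uniquely matched key: the unique matching position
theorem pvBuildIdx_get?_of_count_one (k : String) :
    ∀ (rows : List (List (String × String))), rows.countP (pvMatchE k) = 1 →
      ∃ j, ∃ hj : j < rows.length, pvMatchE k rows[j] = true ∧
        (∀ j', (hj' : j' < rows.length) → pvMatchE k rows[j'] = true → j' = j) ∧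
        ∀ (i : Nat) (d : PySem.Dict String Nat), (pvBuildIdx rows i d).get? k = some (i + j) := by
  intro rows
  induction rows with
  | nil => intro h; simp at h
  | cons r rs ih =>
    intro h
    rw [List.countP_cons] at h
    by_cases hpm : pvMatchE k r = true
    · rw [if_pos hpm] at h
      have hcnt : rs.countP (pvMatchE k) = 0 := by omega
      refine ⟨0, by simp, by simpa using hpm, ?_, ?_⟩
      · intro j' hj' hmj'
        cases j' with
        | zero => rfl
        | succ n =>
          exfalso
          have hn : n < rs.length := by simpa using hj'
          have hmn : pvMatchE k rs[n] = true := by simpa using hmj'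
          exact List.countP_eq_zero.mp hcnt _ (List.getElem_mem hn) hmn
      · intro i d
        simp only [pvBuildIdx]
        cases hr : pvRowGet r "employee_id" with
        | none => simp [pvMatchE, hr] at hpm
        | some e =>
          have hk : PySem.Str.strip e = k := by simpa [pvMatchE, hr] using hpm
          rw [pvBuildIdx_get?_of_count_zero k rs hcnt]
          show (d.insert (PySem.Str.strip e) i).get? k = some (i + 0)
          rw [hk, PySem.Dict.get?_insert]
          simp
    · have hpmf : pvMatchE k r = false := by
        cases hb : pvMatchE k r
        · rfl
        · exact absurd hb hpm
      rw [if_neg hpm] at h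
      have hcnt : rs.countP (pvMatchE k) = 1 := by omega
      obtain ⟨j, hj, hmj, huniq, hidx⟩ := ih hcnt
      refine ⟨j + 1, by simpa using Nat.succ_lt_succ hj, by simpa using hmj, ?_, ?_⟩
      · intro j' hj' hmj'
        cases j' with
        | zero =>
          exfalso
          have : pvMatchE k r = true := by simpa using hmj'
          rw [hpmf] at this; exact Bool.false_ne_true this
        | succ n =>
          have hn : n < rs.length := by simpa using hj'
          have := huniq n hn (by simpa using hmj')
          omega
      · intro i d
        simp only [pvBuildIdx]
        rw [hidx]
        congr 1
        omega

-- A's index is inhabited at k iff some row matches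
theorem pvBuildIdx_isSome_aux (k : String) (rows : List (List (String × String))) :
    ∀ (i : Nat) (d : PySem.Dict String Nat),
      ((pvBuildIdx rows i d).get? k).isSome = (rows.any (pvMatchE k) || (d.get? k).isSome) := by
  induction rows with
  | nil => intro i d; simp [pvBuildIdx]
  | cons r rs ih =>
    intro i d
    simp only [pvBuildIdx, List.any_cons]
    cases hr : pvRowGet r "employee_id" with
    | none => rw [ih]; simp [pvMatchE, hr]
    | some e =>
      rw [ih]
      simp only [pvMatchE, hr]
      by_cases hk : PySem.Str.strip e = k
      · have hk1 : (PySem.Str.strip e == k) = true := beq_iff_eq.mpr hk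
        rw [PySem.Dict.get?_insert]
        simp [hk]
      · have hk1 : (PySem.Str.strip e == k) = false := beq_eq_false_iff_ne.mpr hk
        have hk2 : ¬ (k = PySem.Str.strip e) := fun h => hk h.symm
        rw [PySem.Dict.get?_insert]
        simp [hk1, hk2]

-- one valid entry: A's in-place step on the mapped rows = B's map under the extended net mapping
theorem pvStep_eq (rows : List (List (String × String))) (fm : PySem.Dict String String)
    (entry : List (String × String)) (hok : pvEntryOk rows entry = true) :
    pvStepA (pvBuildIdx rows 0 PySem.Dict.empty) (rows.map (pvApplyRow fm)) entry
      = rows.map (pvApplyRow (pvLogStep (pvKnownIds rows) fm entry)) := by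
  simp only [pvEntryOk, Bool.and_eq_true] at hok
  obtain ⟨h1, h2⟩ := hok
  cases he : pvRowGet entry "employee_id" with
  | none => rw [he] at h1; simp at h1
  | some e =>
    rw [he] at h1
    simp only [Bool.and_eq_true, ne_eq, decide_eq_true_eq, beq_iff_eq] at h1
    obtain ⟨he0, hcnt⟩ := h1
    cases hm' : pvRowGet entry "new_manager_id" with
    | none => rw [hm'] at h2; simp at h2
    | some m =>
      rw [hm'] at h2
      simp only [Bool.and_eq_true, ne_eq, decide_eq_true_eq] at h2
      obtain ⟨hm0, hany⟩ := h2
      obtain ⟨j, hj, hmatch, huniq, hidx⟩ := pvBuildIdx_get?_of_count_one e rows hcnt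
      have hidx0 : (pvBuildIdx rows 0 PySem.Dict.empty).get? e = some j := by
        rw [hidx]; norm_num
      have hsome : ((pvBuildIdx rows 0 PySem.Dict.empty).get? m).isSome = true := by
        rw [pvBuildIdx_isSome_aux]
        simp [hany]
      have hanye : rows.any (pvMatchE e) = true :=
        List.any_eq_true.mpr ⟨rows[j], List.getElem_mem hj, hmatch⟩
      -- reduce A's step
      have hL : pvStepA (pvBuildIdx rows 0 PySem.Dict.empty) (rows.map (pvApplyRow fm)) entry
          = (rows.map (pvApplyRow fm)).modify j (fun row => pvSetManager row m) := by
        simp only [pvStepA, he, hm', he0, hm0, if_false, hidx0, hsome, if_true]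
      -- reduce B's step
      have hmem_e : e ∈ pvKnownIds rows := by
        have h := pvKnownIds_contains rows e
        rw [hanye] at h
        simpa [PySem.Set.contains] using h
      have hmem_m : m ∈ pvKnownIds rows := by
        have h := pvKnownIds_contains rows m
        rw [hany] at h
        simpa [PySem.Set.contains] using h
      have hR : pvLogStep (pvKnownIds rows) fm entry = fm.insert e m := by
        simp [pvLogStep, he, hm', he0, hm0, hmem_e, hmem_m]
      rw [hL, hR]
      apply List.ext_getElem
      · simp [List.length_modify]
      · intro n h1' h2'
        have hn : n < rows.length := by
          simpa [List.length_modify] using h1'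
        rw [List.getElem_modify]
        by_cases hjn : j = n
        · subst hjn
          simp only [List.getElem_map]
          cases hre : pvRowGet rows[j] "employee_id" with
          | none => simp [pvMatchE, hre] at hmatch
          | some e0 =>
            have hk : PySem.Str.strip e0 = e := by simpa [pvMatchE, hre] using hmatch
            simp only [pvApplyRow, hre, hk, PySem.Dict.get?_insert]
            cases hfm : fm.get? e with
            | none => rfl
            | some m0 => exact pvSetManager_setManager _ _ _
        · simp only [if_neg hjn, List.getElem_map]
          cases hre : pvRowGet rows[n] "employee_id" with
          | none => simp [pvApplyRow, hre]
          | some e0 =>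
            have hne : PySem.Str.strip e0 ≠ e := by
              intro hkk
              exact hjn (huniq n hn (by simp [pvMatchE, hre, hkk])).symm
            simp only [pvApplyRow, hre, PySem.Dict.get?_insert]
            simp [hne]

theorem pvFold_eq (rows : List (List (String × String))) (log : List (List (String × String)))
    (hok : log.all (pvEntryOk rows) = true) :
    ∀ (fm : PySem.Dict String String),
      log.foldl (pvStepA (pvBuildIdx rows 0 PySem.Dict.empty)) (rows.map (pvApplyRow fm))
        = rows.map (pvApplyRow (log.foldl (pvLogStep (pvKnownIds rows)) fm)) := by
  induction log with
  | nil => intro fm; rfl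
  | cons entry log ih =>
    simp only [List.all_cons, Bool.and_eq_true] at hok
    intro fm
    simp only [List.foldl_cons]
    rw [pvStep_eq rows fm entry hok.1]
    exact ih hok.2 _

theorem pvMap_empty (rows : List (List (String × String))) :
    rows.map (pvApplyRow PySem.Dict.empty) = rows := by
  have h : ∀ row, pvApplyRow PySem.Dict.empty row = row := by
    intro row
    cases hre : pvRowGet row "employee_id" with
    | none => simp [pvApplyRow, hre]
    | some e => simp [pvApplyRow, hre, PySem.Dict.get?_empty]
  have h' : pvApplyRow PySem.Dict.empty = id := funext fun row => h row
  rw [h', List.map_id]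

-- ===== VERDICT (by name: the statement is the Claim_ definition above) =====
theorem apply_change_log_py_spec : Claim_equal_apply_change_log_py := by
  intro rows log _ hpre
  unfold Spec_apply_change_log_py apply_change_log_py apply_change_log_py_alt
  have h := pvFold_eq rows log hpre PySem.Dict.empty
  rw [pvMap_empty] at h
  exact h
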